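-- pv_equiv track=rewrite | github.com/Fan4Metal/kl_tag | kinopoisk.py | get_main_genre
-- ===== SOURCE A (Python) =====
-- def get_main_genre(genres: list, genres_hierarchy: list) -> str:
--     """Опреде """
--     if not genres:
--         raise ValueError("Список жанров не может быть пустым.")
--
--     # Преобразуем genres в set для быстрого поиска
--     genres_set = set(genres)
--
--     # Ищем первый жанр из иерархии, который есть в genres
--     for genre in genres_hierarchy:
--         if genre in genres_set:
--             return genre
--
--     # Если ничего не найдено, возвращаем первый жанр из списка genres
--     return genres[0]
-- ===== SOURCE B (Python) =====
-- def get_main_genre(genres: list, genres_hierarchy: list) -> str: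
--     if not genres:
--         raise ValueError("Список жанров не может быть пустым.")
--     # rank: genre -> its first index in the hierarchy
--     rank = {}
--     for i, g in enumerate(genres_hierarchy):
--         if g not in rank:
--             rank[g] = i
--     n = len(genres_hierarchy)
--     # pick the genre with the smallest hierarchy rank; absent genres rank n,
--     # so if none is in the hierarchy min returns the first element, genres[0]
--     return min(genres, key=lambda g: rank.get(g, n))
-- ===== Notes on version B (the rewrite author's own statement) =====
-- stated objective: alternative
-- what changed: Instead of scanning the hierarchy for the first genre contained in a set of genres, B builds a rank dict (hierarchy genre -> index) once and selects the minimum-rank element of genres with min(key=...), absent genres ranking len(hierarchy) so the all-absent case yields genres[0].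
import Mathlib
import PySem

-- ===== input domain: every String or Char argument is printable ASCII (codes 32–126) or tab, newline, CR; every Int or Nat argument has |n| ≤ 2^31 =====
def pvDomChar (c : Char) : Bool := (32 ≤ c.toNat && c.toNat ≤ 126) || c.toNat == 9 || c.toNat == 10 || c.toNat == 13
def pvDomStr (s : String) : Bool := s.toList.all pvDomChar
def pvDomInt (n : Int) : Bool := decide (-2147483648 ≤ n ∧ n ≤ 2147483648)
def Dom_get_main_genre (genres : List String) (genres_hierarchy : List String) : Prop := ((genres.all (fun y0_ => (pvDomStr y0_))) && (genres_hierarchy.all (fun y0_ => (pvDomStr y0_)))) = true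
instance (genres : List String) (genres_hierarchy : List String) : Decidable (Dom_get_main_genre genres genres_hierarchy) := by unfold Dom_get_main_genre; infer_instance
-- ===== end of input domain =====

-- B replaces A's hierarchy-scan-with-set by a rank dict over the hierarchy plus a min-by-rank pass over genres (alternative decomposition, same cost).


-- ===== PORT A =====
-- the 'for genre in genres_hierarchy: if genre in genres_set: return genre' loop
def pvAFind (gset : List String) : List String → Option String
  | [] => none
  | h :: t => if h ∈ gset then some h else pvAFind gset t

def get_main_genre (genres : List String) (genres_hierarchy : List String) : String :=
  match genres with
  | [] => ""  -- Python raises ValueError here; excluded by Pre_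
  | g0 :: _ =>
    let genres_set := PySem.Set.ofList genres
    match pvAFind genres_set genres_hierarchy with
    | some genre => genre
    | none => g0  -- genres[0]

-- ===== PORT B =====
-- rank = {}; for i, g in enumerate(genres_hierarchy): if g not in rank: rank[g] = i
def pvBuildRank (genres_hierarchy : List String) : PySem.Dict String Int :=
  (PySem.List.enumerate genres_hierarchy 0).foldl
    (fun d p => if d.contains p.2 then d else d.insert p.2 p.1) PySem.Dict.empty

def get_main_genre_alt (genres : List String) (genres_hierarchy : List String) : String :=
  match genres with
  | [] => ""  -- Python raises ValueError here; excluded by Pre_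
  | _ :: _ =>
    let rank := pvBuildRank genres_hierarchy
    let n := PySem.List.len genres_hierarchy
    match PySem.List.min? genres (fun g => rank.getD g n) with
    | some m => m
    | none => ""  -- unreachable: genres is nonempty

-- ===== PRECONDITION & SPEC =====
-- Pre_ excludes only genres = [], where the Python A raises ValueError.
def Pre_get_main_genre (genres : List String) (genres_hierarchy : List String) : Prop :=
  genres ≠ []
instance (genres : List String) (genres_hierarchy : List String) : Decidable (Pre_get_main_genre genres genres_hierarchy) := by unfold Pre_get_main_genre; infer_instance

def pvWitness_get_main_genre : List String × List String := (["thriller", "drama"], ["comedy", "drama"])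

def Spec_get_main_genre (genres : List String) (genres_hierarchy : List String) (out : String) : Prop := out = get_main_genre_alt genres genres_hierarchy
instance (genres : List String) (genres_hierarchy : List String) (out : String) : Decidable (Spec_get_main_genre genres genres_hierarchy out) := by unfold Spec_get_main_genre; infer_instance

-- ===== CLAIM (what is proved, stated in full; the proofs are below) =====
def Claim_equal_get_main_genre : Prop := ∀ (genres : List String) (genres_hierarchy : List String), Dom_get_main_genre genres genres_hierarchy → Pre_get_main_genre genres genres_hierarchy → Spec_get_main_genre genres genres_hierarchy (get_main_genre genres genres_hierarchy)

-- ===== LEMMAS AND PROOFS =====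

-- rank-building loop: an already-present key keeps its value (first occurrence wins)
theorem pvBuildRank_get?_some (hs : List String) (s : Int) (d : PySem.Dict String Int)
    (g : String) (v : Int) (hvv : d.get? g = some v) :
    ((PySem.List.enumerate hs s).foldl
      (fun d p => if d.contains p.2 then d else d.insert p.2 p.1) d).get? g = some v := by
  induction hs generalizing s d with
  | nil => simpa [PySem.List.enumerate_nil] using hvv
  | cons h t ih =>
    rw [PySem.List.enumerate_cons]
    simp only [List.foldl_cons]
    by_cases hc : d.contains h = true
    · rw [if_pos hc]; exact ih _ _ hvv
    · rw [if_neg hc]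
      by_cases hg : g = h
      · subst hg
        rw [PySem.Dict.contains_eq_isSome_get?, hvv] at hc
        simp at hc
      · exact ih _ _ (by rw [PySem.Dict.get?_insert_of_ne _ _ hg]; exact hvv)

-- rank-building loop: an absent key ends up at (s + first index in hs), or stays absent
theorem pvBuildRank_get?_none (hs : List String) (s : Int) (d : PySem.Dict String Int)
    (g : String) (hvv : d.get? g = none) :
    ((PySem.List.enumerate hs s).foldl
      (fun d p => if d.contains p.2 then d else d.insert p.2 p.1) d).get? g =
    (if g ∈ hs then some (s + (hs.idxOf g : Int)) else none) := by
  induction hs generalizing s d with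
  | nil => simpa [PySem.List.enumerate_nil] using hvv
  | cons h t ih =>
    rw [PySem.List.enumerate_cons]
    simp only [List.foldl_cons]
    by_cases hg : g = h
    · subst hg
      by_cases hc : d.contains g = true
      · rw [PySem.Dict.contains_eq_isSome_get?, hvv] at hc; simp at hc
      · rw [if_neg hc]
        have : (d.insert g s).get? g = some s := PySem.Dict.get?_insert_self _ _ _
        rw [pvBuildRank_get?_some t (s+1) _ g s this]
        simp
    · have hbeq : (h == g) = false := by simp [Ne.symm hg]
      by_cases hc : d.contains h = true
      · rw [if_pos hc, ih _ _ hvv]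
        by_cases hm : g ∈ t
        · simp [hm, hg, List.idxOf_cons, hbeq]; ring
        · simp [hm, hg]
      · rw [if_neg hc]
        have : (d.insert h s).get? g = none := by
          rw [PySem.Dict.get?_insert_of_ne _ _ hg]; exact hvv
        rw [ih _ _ this]
        by_cases hm : g ∈ t
        · simp [hm, hg, List.idxOf_cons, hbeq]; ring
        · simp [hm, hg]

-- rank.get(g, n) is exactly the first index of g in the hierarchy (= its length when absent)
theorem pvBuildRank_getD (hs : List String) (g : String) :
    (pvBuildRank hs).getD g (PySem.List.len hs) = (hs.idxOf g : Int) := by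
  rw [PySem.Dict.getD_eq_get?_getD, pvBuildRank,
    pvBuildRank_get?_none hs 0 PySem.Dict.empty g (PySem.Dict.get?_empty _)]
  by_cases hm : g ∈ hs
  · simp [hm]
  · have h2 : hs.idxOf g = hs.length := List.idxOf_eq_length_iff.mpr hm
    rw [if_neg hm, h2, PySem.List.len_eq]
    rfl

-- A's loop found nothing: no genre occurs in the hierarchy
theorem pvAFind_none (gset hs : List String) (h : pvAFind gset hs = none) :
    ∀ g ∈ gset, g ∉ hs := by
  induction hs with
  | nil => simp
  | cons x t ih =>
    intro g hg
    simp only [pvAFind] at h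
    by_cases hx : x ∈ gset
    · simp [hx] at h
    · rw [if_neg hx] at h
      have := ih h g hg
      simp only [List.mem_cons]
      rintro (rfl | hgt)
      · exact hx hg
      · exact this hgt

-- A's loop result: it is a present genre of minimal first index in the hierarchy
theorem pvAFind_some (gset hs : List String) (a : String) (h : pvAFind gset hs = some a) :
    a ∈ gset ∧ a ∈ hs ∧ ∀ g ∈ gset, hs.idxOf a ≤ hs.idxOf g := by
  induction hs with
  | nil => simp [pvAFind] at h
  | cons x t ih =>
    simp only [pvAFind] at h
    by_cases hx : x ∈ gset
    · rw [if_pos hx] at h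
      injection h with h
      subst h
      exact ⟨hx, by simp, fun g _ => by simp [List.idxOf_cons]⟩
    · rw [if_neg hx] at h
      obtain ⟨h1, h2, h3⟩ := ih h
      refine ⟨h1, by simp [h2], fun g hg => ?_⟩
      have hax : (x == a) = false := by
        simp; rintro rfl; exact hx h1
      have hgx : (x == g) = false := by
        simp; rintro rfl; exact hx hg
      simp only [List.idxOf_cons, hax, hgx, cond_false]
      exact Nat.succ_le_succ (h3 g hg)

-- min?'s fold keeps the running element when no strict improvement exists
theorem pvFoldlMin_const {α κ : Type} [LT κ] [DecidableLT κ] (key : α → κ) (l : List α) (m : α)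
    (h : ∀ g ∈ l, ¬ key g < key m) :
    l.foldl (fun acc x => match acc with
      | none => some x
      | some mm => if key x < key mm then some x else some mm) (some m) = some m := by
  induction l with
  | nil => rfl
  | cons x t ih =>
    simp only [List.foldl_cons]
    rw [if_neg (h x (by simp))]
    exact ih (fun g hg => h g (by simp [hg]))

theorem min?_cons_of_no_lt {α κ : Type} [LT κ] [DecidableLT κ] (key : α → κ) (g0 : α) (rest : List α)
    (h : ∀ g ∈ rest, ¬ key g < key g0) :
    PySem.List.min? (g0 :: rest) key = some g0 := by
  unfold PySem.List.min?
  simp only [List.foldl_cons]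
  exact pvFoldlMin_const key rest g0 h

-- ===== VERDICT (by name: the statement is the Claim_ definition above) =====
theorem get_main_genre_spec : Claim_equal_get_main_genre := by
  intro genres hs _ hpre
  unfold Spec_get_main_genre get_main_genre get_main_genre_alt
  match genres, hpre with
  | g0 :: rest, _ =>
  simp only
  have hkey : ∀ g, (pvBuildRank hs).getD g (PySem.List.len hs) = (hs.idxOf g : Int) :=
    pvBuildRank_getD hs
  cases hfind : pvAFind (PySem.Set.ofList (g0 :: rest)) hs with
  | none =>
    -- no genre occurs in the hierarchy: every key equals len hs, min? keeps g0
    have habs : ∀ g ∈ g0 :: rest, g ∉ hs := by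
      intro g hg
      exact pvAFind_none _ _ hfind g (by rw [PySem.Set.mem_ofList]; exact hg)
    have hlen : ∀ g ∈ g0 :: rest, hs.idxOf g = hs.length := fun g hg =>
      List.idxOf_eq_length_iff.mpr (habs g hg)
    rw [min?_cons_of_no_lt _ _ _ (by
      intro g hg
      rw [hkey, hkey, hlen g (by simp [hg]), hlen g0 (by simp)]
      exact lt_irrefl _)]
  | some a =>
    obtain ⟨ha1, ha2, ha3⟩ := pvAFind_some _ _ _ hfind
    rw [PySem.Set.mem_ofList] at ha1
    cases hmin : PySem.List.min? (g0 :: rest) (fun g => (pvBuildRank hs).getD g (PySem.List.len hs)) with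
    | none => exact absurd hmin (by simp [PySem.List.min?_eq_none_iff])
    | some m =>
      have hmem : m ∈ g0 :: rest := PySem.List.min?_mem hmin
      have hmin' := PySem.List.min?_isMin hmin
      have h1 : hs.idxOf a ≤ hs.idxOf m :=
        ha3 m (by rw [PySem.Set.mem_ofList]; exact hmem)
      have h2 : hs.idxOf m ≤ hs.idxOf a := by
        have := hmin' a ha1
        rw [hkey, hkey] at this
        exact_mod_cast this
      have heq : hs.idxOf m = hs.idxOf a := le_antisymm h2 h1
      have hlt : hs.idxOf a < hs.length := List.idxOf_lt_length_iff.mpr ha2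
      have hma : hs[hs.idxOf a] = a := List.getElem_idxOf hlt
      have hmm : hs[hs.idxOf m]'(by rw [heq]; exact hlt) = m := List.getElem_idxOf _
      simp only [heq] at hmm
      show a = m
      rw [← hma, ← hmm]
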